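-- pv_equiv track=rewrite | github.com/inonprince/zmk-glorious-lefty | scripts/update_kle_layouts.py | build_move_map
-- ===== SOURCE A (Python) =====
-- from typing import Any, Dict, Iterable, List, Optional, Tuple
--
-- def build_move_map(old_sigs: List[str], new_sigs: List[str]) -> Dict[int, int]:
--     old_positions: Dict[str, List[int]] = {}
--     new_positions: Dict[str, List[int]] = {}
--
--     for idx, sig in enumerate(old_sigs):
--         old_positions.setdefault(sig, []).append(idx)
--     for idx, sig in enumerate(new_sigs):
--         new_positions.setdefault(sig, []).append(idx)
--
--     move_map: Dict[int, int] = {}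
--     for sig, new_idxs in new_positions.items():
--         old_idxs = old_positions.get(sig, [])
--         for old_idx, new_idx in zip(old_idxs, new_idxs):
--             move_map[new_idx] = old_idx
--
--     return move_map
-- ===== SOURCE B (Python) =====
-- def build_move_map(old_sigs, new_sigs):
--     move_map = {}
--     for sig in dict.fromkeys(new_sigs):
--         old_idxs = [i for i, s in enumerate(old_sigs) if s == sig]
--         new_idxs = [i for i, s in enumerate(new_sigs) if s == sig]
--         for old_idx, new_idx in zip(old_idxs, new_idxs):
--             move_map[new_idx] = old_idx
--     return move_map
-- ===== Notes on version B (the rewrite author's own statement) =====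
-- stated objective: simpler
-- what changed: B drops both grouping dicts: it walks the distinct new signatures once (dict.fromkeys) and recomputes each signature's old/new index lists with filtered scans, pairing them directly with zip.
import Mathlib
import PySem

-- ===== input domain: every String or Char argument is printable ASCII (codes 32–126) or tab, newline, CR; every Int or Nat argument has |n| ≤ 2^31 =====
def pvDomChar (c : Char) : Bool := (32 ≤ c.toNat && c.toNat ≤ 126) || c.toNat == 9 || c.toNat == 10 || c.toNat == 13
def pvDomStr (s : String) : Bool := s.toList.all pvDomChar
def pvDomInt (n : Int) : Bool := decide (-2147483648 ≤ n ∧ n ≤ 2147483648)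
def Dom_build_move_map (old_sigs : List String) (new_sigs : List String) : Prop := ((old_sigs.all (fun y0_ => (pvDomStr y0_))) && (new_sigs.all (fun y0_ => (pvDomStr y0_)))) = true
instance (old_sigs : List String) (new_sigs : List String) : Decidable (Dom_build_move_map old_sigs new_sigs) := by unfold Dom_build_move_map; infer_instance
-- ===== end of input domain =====

-- B replaces A's two grouping dicts by one walk over the distinct new signatures,
-- recomputing each signature's old/new index lists with filtered scans (simpler decomposition, not faster).

-- ===== PORT A =====
-- 'for idx, sig in enumerate(sigs): positions.setdefault(sig, []).append(idx)'  (A runs this loop twice)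
def pvGroupIdx (sigs : List String) : PySem.Dict String (List Int) :=
  (PySem.List.enumerate sigs).foldl
    (fun d p => d.modify p.2 [] (fun v => v ++ [p.1])) PySem.Dict.empty

def build_move_map (old_sigs : List String) (new_sigs : List String) : List (Int × Int) :=
  let old_positions := pvGroupIdx old_sigs
  let new_positions := pvGroupIdx new_sigs
  let move_map : PySem.Dict Int Int :=
    new_positions.items.foldl
      (fun m q =>
        let old_idxs := old_positions.getD q.1 []
        (old_idxs.zip q.2).foldl (fun m r => m.insert r.2 r.1) m)
      PySem.Dict.empty
  move_map.items

-- ===== PORT B =====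
def build_move_map_alt (old_sigs : List String) (new_sigs : List String) : List (Int × Int) :=
  let move_map : PySem.Dict Int Int :=
    (PySem.List.dedup new_sigs).foldl
      (fun m sig =>
        let old_idxs := ((PySem.List.enumerate old_sigs).filter (fun p => p.2 == sig)).map (·.1)
        let new_idxs := ((PySem.List.enumerate new_sigs).filter (fun p => p.2 == sig)).map (·.1)
        (old_idxs.zip new_idxs).foldl (fun m r => m.insert r.2 r.1) m)
      PySem.Dict.empty
  move_map.items

-- ===== PRECONDITION & SPEC =====
def Spec_build_move_map (old_sigs : List String) (new_sigs : List String) (out : List (Int × Int)) : Prop := out = build_move_map_alt old_sigs new_sigs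
instance (old_sigs : List String) (new_sigs : List String) (out : List (Int × Int)) : Decidable (Spec_build_move_map old_sigs new_sigs out) := by unfold Spec_build_move_map; infer_instance

-- ===== CLAIM (what is proved, stated in full; the proofs are below) =====
def Claim_equal_build_move_map : Prop := ∀ (old_sigs : List String) (new_sigs : List String), Dom_build_move_map old_sigs new_sigs → Spec_build_move_map old_sigs new_sigs (build_move_map old_sigs new_sigs)

-- ===== LEMMAS AND PROOFS =====

theorem pvGroupIdx_getD (sigs : List String) (s : String) :
    (pvGroupIdx sigs).getD s [] =
      ((PySem.List.enumerate sigs).filter (fun p => p.2 == s)).map (·.1) := by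
  unfold pvGroupIdx
  have h : (PySem.List.enumerate sigs).foldl
      (fun d p => d.modify p.2 [] (fun v => v ++ [p.1])) PySem.Dict.empty
    = ((PySem.List.enumerate sigs).map (fun p => (p.2, p.1))).foldl
      (fun d p => d.modify p.1 [] (fun v => v ++ [p.2])) PySem.Dict.empty := by
    rw [List.foldl_map]
  rw [h, PySem.Dict.getD_foldl_modify_append, List.filter_map, List.map_map]
  simp [Function.comp_def]

theorem pvGroupIdx_keys (sigs : List String) :
    (pvGroupIdx sigs).keys = PySem.List.dedup sigs := by
  unfold pvGroupIdx
  rw [PySem.Dict.keys_foldl_modify_key (PySem.List.enumerate sigs)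
        (fun p => p.2) [] (fun _ p v => v ++ [p.1]) PySem.Dict.empty,
      PySem.List.map_snd_enumerate]
  simp [PySem.Dict.keys_empty, PySem.List.dedup_eq_ofList, PySem.Set.ofList_eq_foldl,
        PySem.Set.update]

theorem pvGroupIdx_nodup (sigs : List String) : (pvGroupIdx sigs).keys.Nodup := by
  unfold pvGroupIdx
  exact PySem.Dict.nodup_keys_foldl_modify_key (PySem.List.enumerate sigs)
    (fun p => p.2) [] (fun _ p v => v ++ [p.1]) PySem.Dict.empty
    (by simp [PySem.Dict.keys_empty])

theorem pvGroupIdx_items (sigs : List String) :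
    (pvGroupIdx sigs).items =
      (PySem.List.dedup sigs).map
        (fun s => (s, ((PySem.List.enumerate sigs).filter (fun p => p.2 == s)).map (·.1))) := by
  rw [PySem.Dict.items_eq_map_keys _ (pvGroupIdx_nodup sigs) [], pvGroupIdx_keys]
  exact List.map_congr_left (fun k _ => by rw [pvGroupIdx_getD])

-- ===== VERDICT (by name: the statement is the Claim_ definition above) =====
theorem build_move_map_spec : Claim_equal_build_move_map := by
  intro old_sigs new_sigs _
  unfold Spec_build_move_map build_move_map build_move_map_alt
  simp only []
  rw [pvGroupIdx_items new_sigs, List.foldl_map]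
  simp only [pvGroupIdx_getD]
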